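-- pv_equiv track=rewrite | github.com/iSundram/ion | ioncube_decoder.py | extract_encoded_data
-- ===== SOURCE A (Python) =====
-- from typing import Optional, Tuple, Dict, Any
--
-- def extract_encoded_data(content: str) -> Optional[str]:
--     """Extract the base64 encoded data from the file"""
--     lines = content.split('\n')
--
--     # Find where the encoded data starts (after the ?>)
--     encoded_lines = []
--     found_start = False
--
--     for line in lines:
--         if line.strip() == '?>':
--             found_start = True
--             continue
--         if found_start and line.strip():
--             # Remove any non-base64 characters and newlines
--             clean_line = ''.join(c for c in line if c.isalnum() or c in '+/=')
--             if clean_line: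
--                 encoded_lines.append(clean_line)
--
--     if not encoded_lines:
--         return None
--
--     return ''.join(encoded_lines)
-- ===== SOURCE B (Python) =====
-- def _is_b64_char(c):
--     return c.isalnum() or c in '+/='
--
-- def extract_encoded_data(content):
--     """Extract the base64 encoded data from the file"""
--     lines = content.split('\n')
--     for i, line in enumerate(lines):
--         if line.strip() == '?>':
--             # everything after the marker, squeezed through one character filter:
--             # whitespace-only lines, stray '?>' marker lines and the '\n' separators
--             # contain no base64 characters, so no line-level bookkeeping is needed
--             data = ''.join(filter(_is_b64_char, '\n'.join(lines[i + 1:])))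
--             return data or None
--     return None
-- ===== Notes on version B (the rewrite author's own statement) =====
-- stated objective: simpler
-- what changed: A classifies each tail line (skip '?>' lines, skip blank lines, per-line clean, drop empty cleans, collect a list, join); B locates the marker and then applies one character-level base64 filter to the whole joined tail, eliminating all per-line cleaning and emptiness bookkeeping, which is correct because every character of a line A skips fails the filter anyway.
import Mathlib
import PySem

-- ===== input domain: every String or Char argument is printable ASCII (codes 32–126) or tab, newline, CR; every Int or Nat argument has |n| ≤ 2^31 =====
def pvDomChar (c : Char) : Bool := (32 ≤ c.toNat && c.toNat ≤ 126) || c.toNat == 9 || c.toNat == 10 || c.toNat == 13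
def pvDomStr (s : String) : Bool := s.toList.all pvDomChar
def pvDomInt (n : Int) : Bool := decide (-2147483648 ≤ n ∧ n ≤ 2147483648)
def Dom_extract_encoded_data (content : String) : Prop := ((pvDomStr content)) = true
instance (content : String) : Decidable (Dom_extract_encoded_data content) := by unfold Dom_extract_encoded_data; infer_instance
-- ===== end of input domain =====

-- B replaces A's per-line cleaning with blank/marker-line bookkeeping by one character-level
-- base64 filter over the joined tail after the marker (objective: simpler, same cost).


-- ===== PORT A =====
-- c.isalnum() or c in '+/='
def pvIsB64 (c : Char) : Bool := PySem.Chars.isalnum c || PySem.Str.isIn (String.ofList [c]) "+/="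

-- clean_line = ''.join(c for c in line if c.isalnum() or c in '+/=')
def pvClean (line : String) : String :=
  PySem.Str.join "" ((line.toList.filter pvIsB64).map (fun c => String.ofList [c]))

-- the body of A's for-loop, carrying (found_start, encoded_lines)
def pvStep (st : Bool × List String) (line : String) : Bool × List String :=
  if PySem.Str.strip line == "?>" then (true, st.2)
  else if st.1 && !(PySem.Str.strip line == "") then
    let clean_line := pvClean line
    if !(clean_line == "") then (st.1, st.2 ++ [clean_line]) else st
  else st

def extract_encoded_data (content : String) : Option String :=
  -- content.split('\n'): sep "\n" ≠ "" so split? is always some; getD only makes it total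
  let lines := (PySem.Str.split? content "\n").getD []
  let res : Bool × List String := lines.foldl pvStep (false, [])
  if res.2 = [] then none else some (PySem.Str.join "" res.2)

-- ===== PORT B =====
def extract_encoded_data_alt (content : String) : Option String :=
  let lines := (PySem.Str.split? content "\n").getD []
  -- the for/enumerate loop returning at the first marker line = first index with strip == '?>'
  match lines.findIdx? (fun l => PySem.Str.strip l == "?>") with
  | none => none
  | some i =>
    -- ''.join(filter(_is_b64_char, '\n'.join(lines[i+1:])))
    let data := String.ofList ((PySem.Str.join "\n" (lines.drop (i + 1))).toList.filter pvIsB64)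
    if data == "" then none else some data

-- ===== PRECONDITION & SPEC =====
def Spec_extract_encoded_data (content : String) (out : Option String) : Prop := out = extract_encoded_data_alt content
instance (content : String) (out : Option String) : Decidable (Spec_extract_encoded_data content out) := by unfold Spec_extract_encoded_data; infer_instance

-- ===== CLAIM (what is proved, stated in full; the proofs are below) =====
def Claim_equal_extract_encoded_data : Prop := ∀ (content : String), Dom_extract_encoded_data content → Spec_extract_encoded_data content (extract_encoded_data content)

-- ===== LEMMAS AND PROOFS =====

-- proof-only helper: what A contributes for one tail line
def pvCleanTail (line : String) : Option String :=
  if !(PySem.Str.strip line == "?>") && !(PySem.Str.strip line == "") then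
    let cl := pvClean line
    if !(cl == "") then some cl else none
  else none

lemma pvStep_true (acc : List String) (ls : List String) :
    ls.foldl pvStep (true, acc) = (true, acc ++ ls.filterMap pvCleanTail) := by
  induction ls generalizing acc with
  | nil => simp
  | cons l ls ih =>
    rw [List.foldl_cons, List.filterMap_cons]
    by_cases h1 : PySem.Str.strip l == "?>"
    · have hc : pvCleanTail l = none := by simp [pvCleanTail, h1]
      have hs : pvStep (true, acc) l = (true, acc) := by simp [pvStep, h1]
      rw [hc, hs, ih]
    · by_cases h2 : PySem.Str.strip l == ""
      · have hc : pvCleanTail l = none := by simp [pvCleanTail, h2]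
        have hs : pvStep (true, acc) l = (true, acc) := by
          simp [pvStep, h1, h2]
        rw [hc, hs, ih]
      · by_cases h3 : pvClean l == ""
        · have hc : pvCleanTail l = none := by simp [pvCleanTail, h1, h2, h3]
          have hs : pvStep (true, acc) l = (true, acc) := by
            simp [pvStep, h1, h2, h3]
          rw [hc, hs, ih]
        · have hc : pvCleanTail l = some (pvClean l) := by simp [pvCleanTail, h1, h2, h3]
          have hs : pvStep (true, acc) l = (true, acc ++ [pvClean l]) := by
            simp [pvStep, h1, h2, h3]
          rw [hc, hs, ih]
          simp

lemma pvStep_false (ls : List String) :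
    (ls.foldl pvStep (false, [])).2 =
      match ls.findIdx? (fun l => PySem.Str.strip l == "?>") with
      | none => []
      | some i => (ls.drop (i + 1)).filterMap pvCleanTail := by
  induction ls with
  | nil => simp
  | cons l ls ih =>
    by_cases h1 : PySem.Str.strip l == "?>"
    · have hs : pvStep (false, []) l = (true, []) := by simp [pvStep, h1]
      rw [List.foldl_cons, hs, pvStep_true]
      simp [List.findIdx?_cons, h1]
    · have hs : pvStep (false, []) l = (false, []) := by simp [pvStep, h1]
      rw [List.foldl_cons, hs, ih]
      simp only [List.findIdx?_cons, h1, Bool.false_eq_true, if_false]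
      cases hfi : ls.findIdx? (fun l => PySem.Str.strip l == "?>") with
      | none => simp
      | some i => simp [List.drop_succ_cons]

-- char ≤ read on code points
lemma pvCharLe (a b : Char) : a ≤ b ↔ a.toNat ≤ b.toNat := by
  simp [Char.le_def]; exact UInt32.le_iff_toNat_le

-- a whitespace character is never a base64 character
lemma pvIsB64_of_isspace (c : Char) (h : PySem.Chars.isspace c = true) : pvIsB64 c = false := by
  have hn : c.toNat = 32 ∨ (9 ≤ c.toNat ∧ c.toNat ≤ 13) ∨ (28 ≤ c.toNat ∧ c.toNat ≤ 31) ∨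
      c.toNat = 133 ∨ c.toNat = 160 ∨ c.toNat = 5760 ∨ (8192 ≤ c.toNat ∧ c.toNat ≤ 8202) ∨
      c.toNat = 8232 ∨ c.toNat = 8233 ∨ c.toNat = 8239 ∨ c.toNat = 8287 ∨ c.toNat = 12288 := by
    simp only [PySem.Chars.isspace, Bool.or_eq_true, Bool.and_eq_true, decide_eq_true_eq] at h
    tauto
  apply Bool.eq_false_iff.mpr
  intro hb
  simp only [pvIsB64, PySem.Chars.isalnum, PySem.Chars.isalpha, PySem.Chars.isdigit,
    PySem.Chars.isupper, PySem.Chars.islower, Bool.or_eq_true, Bool.and_eq_true,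
    decide_eq_true_eq] at hb
  rcases hb with ((⟨h1, h2⟩ | ⟨h1, h2⟩) | ⟨h1, h2⟩) | hmem
  · rw [pvCharLe, show ('A').toNat = 65 from rfl] at h1
    rw [pvCharLe, show ('Z').toNat = 90 from rfl] at h2
    omega
  · rw [pvCharLe, show ('a').toNat = 97 from rfl] at h1
    rw [pvCharLe, show ('z').toNat = 122 from rfl] at h2
    omega
  · rw [pvCharLe, show ('0').toNat = 48 from rfl] at h1
    rw [pvCharLe, show ('9').toNat = 57 from rfl] at h2
    omega
  · rw [PySem.Str.isIn, String.toList_ofList, PySem.Chars.isIn_iff_infix,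
      List.singleton_infix_iff] at hmem
    have : c = '+' ∨ c = '/' ∨ c = '=' := by simpa using hmem
    rcases this with rfl | rfl | rfl <;> simp_all

-- filtering ignores the whitespace strip removes
lemma pvFilter_strip (cs : List Char) :
    (PySem.Chars.strip cs).filter pvIsB64 = cs.filter pvIsB64 := by
  have h1 : ∀ ds : List Char,
      (ds.dropWhile PySem.Chars.isspace).filter pvIsB64 = ds.filter pvIsB64 := by
    intro ds
    conv_rhs => rw [← List.takeWhile_append_dropWhile (p := PySem.Chars.isspace) (l := ds)]
    rw [List.filter_append]
    have hz : (ds.takeWhile PySem.Chars.isspace).filter pvIsB64 = [] := by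
      rw [List.filter_eq_nil_iff]
      intro a ha
      simp [pvIsB64_of_isspace a (List.mem_takeWhile_imp ha)]
    rw [hz, List.nil_append]
  simp only [PySem.Chars.strip, PySem.Chars.rstrip, PySem.Chars.lstrip]
  rw [List.filter_reverse, h1, List.filter_reverse, List.reverse_reverse, h1]

-- A's per-line clean, as characters: exactly B's filter of the line
lemma pvClean_toList (l : String) : (pvClean l).toList = l.toList.filter pvIsB64 := by
  simp only [pvClean, PySem.Str.join, String.toList_ofList, List.map_map]
  have : (String.toList ∘ fun c => String.ofList [c]) = (fun c => [c]) := by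
    funext c; simp
  rw [this]
  exact PySem.Chars.join_nil_singletons (l.toList.filter pvIsB64)

-- strip-equality read on character lists
lemma pvStrip_beq {l : String} {t : String} (h : (PySem.Str.strip l == t) = true) :
    PySem.Chars.strip l.toList = t.toList := by
  have := beq_iff_eq.mp h
  rw [PySem.Str.strip] at this
  rw [← this, String.toList_ofList]

-- the single-line bridge: A's per-line contribution, as characters
lemma pvCleanTail_chars (l : String) :
    ((pvCleanTail l).map String.toList).getD [] = l.toList.filter pvIsB64 := by
  unfold pvCleanTail
  by_cases h1 : PySem.Str.strip l == "?>"
  · have : l.toList.filter pvIsB64 = [] := by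
      rw [← pvFilter_strip, pvStrip_beq h1]; decide
    simp [h1, this]
  · by_cases h2 : PySem.Str.strip l == ""
    · have : l.toList.filter pvIsB64 = [] := by
        rw [← pvFilter_strip, pvStrip_beq h2]; decide
      simp [h1, h2, this]
    · by_cases h3 : pvClean l == ""
      · have h3' : (pvClean l).toList = [] := by
          rw [beq_iff_eq.mp h3]; rfl
        rw [pvClean_toList] at h3'
        simp [h1, h2, h3, h3']
      · simp [h1, h2, h3, pvClean_toList]

-- ''.join concatenates
lemma pvJoin_nil (xs : List (List Char)) : PySem.Chars.join [] xs = xs.flatten := by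
  induction xs with
  | nil => simp [PySem.Chars.join_nil]
  | cons p xs ih =>
    cases xs with
    | nil => simp [PySem.Chars.join_singleton]
    | cons q rest =>
      rw [PySem.Chars.join_cons_cons, ih, List.flatten_cons]
      simp

-- the tail bridge: A's cleaned lines concatenated = B's one filter of the joined tail
lemma pvTail_chars (ls : List String) :
    ((ls.filterMap pvCleanTail).map String.toList).flatten
      = (PySem.Str.join "\n" ls).toList.filter pvIsB64 := by
  induction ls with
  | nil => simp [PySem.Str.join, PySem.Chars.join_nil]
  | cons l ls ih =>
    have hstep : (((l :: ls).filterMap pvCleanTail).map String.toList).flatten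
        = ((pvCleanTail l).map String.toList).getD []
          ++ ((ls.filterMap pvCleanTail).map String.toList).flatten := by
      rw [List.filterMap_cons]
      cases pvCleanTail l <;> simp
    rw [hstep, pvCleanTail_chars, ih]
    have hj : ∀ xs : List String, (PySem.Str.join "\n" xs).toList
        = PySem.Chars.join ['\n'] (xs.map String.toList) := by
      intro xs; rw [PySem.Str.join, String.toList_ofList]; rfl
    cases ls with
    | nil => simp [hj, PySem.Chars.join_nil, PySem.Chars.join_singleton]
    | cons m ms =>
      rw [hj, hj]
      simp only [List.map_cons]
      rw [PySem.Chars.join_cons_cons, List.filter_append, List.filter_append]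
      have : ['\n'].filter pvIsB64 = [] := by decide
      rw [this]
      simp

-- every line A keeps cleans to a nonempty string
lemma pvCleanTail_ne_empty {l cl : String} (h : pvCleanTail l = some cl) : cl.toList ≠ [] := by
  by_cases h1 : (!(PySem.Str.strip l == "?>") && !(PySem.Str.strip l == "")) = true
  · by_cases h3 : pvClean l == ""
    · simp [pvCleanTail, h1, h3] at h
    · have hcl : cl = pvClean l := by
        simp [pvCleanTail, h1, h3] at h
        exact h.symm
      subst hcl
      intro hnil
      have : pvClean l = "" := by
        have := congrArg String.ofList hnil
        simpa [String.ofList_toList] using this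
      simp [this] at h3
  · simp [pvCleanTail, h1] at h

-- ===== VERDICT (by name: the statement is the Claim_ definition above) =====
theorem extract_encoded_data_spec : Claim_equal_extract_encoded_data := by
  intro content _
  simp only [Spec_extract_encoded_data, extract_encoded_data, extract_encoded_data_alt]
  rw [pvStep_false]
  cases hfi : ((PySem.Str.split? content "\n").getD []).findIdx?
      (fun l => PySem.Str.strip l == "?>") with
  | none => simp
  | some i =>
    simp only
    set ls := ((PySem.Str.split? content "\n").getD []).drop (i + 1) with hls
    have hchars := pvTail_chars ls
    by_cases hc : ls.filterMap pvCleanTail = []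
    · have hB : (String.ofList ((PySem.Str.join "\n" ls).toList.filter pvIsB64) == "") = true := by
        rw [beq_iff_eq, ← hchars, hc]
        rfl
      rw [if_pos hc, if_pos hB]
    · have hB : ¬ ((String.ofList ((PySem.Str.join "\n" ls).toList.filter pvIsB64) == "") = true) := by
        intro hB
        apply hc
        have hflat : ((ls.filterMap pvCleanTail).map String.toList).flatten = [] := by
          rw [hchars]
          have := congrArg String.toList (beq_iff_eq.mp hB)
          simpa using this
        cases hl : ls.filterMap pvCleanTail with
        | nil => rfl
        | cons cl cls =>
          exfalso
          have hmem : cl ∈ ls.filterMap pvCleanTail := by rw [hl]; exact List.mem_cons_self ..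
          obtain ⟨a, _, ha⟩ := List.mem_filterMap.mp hmem
          apply pvCleanTail_ne_empty ha
          rw [hl] at hflat
          rw [List.map_cons, List.flatten_cons] at hflat
          exact (List.append_eq_nil_iff.mp hflat).1
      rw [if_neg hc, if_neg hB]
      have hval : PySem.Str.join "" (ls.filterMap pvCleanTail)
          = String.ofList ((PySem.Str.join "\n" ls).toList.filter pvIsB64) := by
        rw [← hchars, PySem.Str.join]
        have : ("" : String).toList = [] := rfl
        rw [this, pvJoin_nil]
      exact congrArg some hval
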